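-- pv_equiv track=rewrite | github.com/openSUSE/salt-formulas | 389ds-formula/tests/utils.py | reduce_state_out
-- ===== SOURCE A (Python) =====
-- def reduce_state_out(data):
--     out = {}
--
--     for state, subdata in data.items():
--         tmp = {}
--         for k, v in subdata.items():
--             if k in ['changes', 'comment', 'name', 'result']:
--                 tmp[k] = v
--         out[state] = dict(sorted(tmp.items()))
--
--     return out
-- ===== SOURCE B (Python) =====
-- def reduce_state_out(data):
--     out = {state: {} for state in data}
--     flat = sorted(((state, k, sub[k])
--                    for state, sub in data.items()
--                    for k in sub
--                    if k in ('changes', 'comment', 'name', 'result')),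
--                   key=lambda t: t[:2])
--     for state, k, v in flat:
--         out[state][k] = v
--     return out
-- ===== Notes on version B (the rewrite author's own statement) =====
-- stated objective: alternative
-- what changed: B replaces A's per-state filter-into-a-temp-dict-then-sort with three staged passes: it seeds an output skeleton keyed by every state, builds ONE global list of all allowed (state, key, value) triples, sorts that list once by (state, key), and then groups the sorted triples back into the seeded skeleton.
import Mathlib
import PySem

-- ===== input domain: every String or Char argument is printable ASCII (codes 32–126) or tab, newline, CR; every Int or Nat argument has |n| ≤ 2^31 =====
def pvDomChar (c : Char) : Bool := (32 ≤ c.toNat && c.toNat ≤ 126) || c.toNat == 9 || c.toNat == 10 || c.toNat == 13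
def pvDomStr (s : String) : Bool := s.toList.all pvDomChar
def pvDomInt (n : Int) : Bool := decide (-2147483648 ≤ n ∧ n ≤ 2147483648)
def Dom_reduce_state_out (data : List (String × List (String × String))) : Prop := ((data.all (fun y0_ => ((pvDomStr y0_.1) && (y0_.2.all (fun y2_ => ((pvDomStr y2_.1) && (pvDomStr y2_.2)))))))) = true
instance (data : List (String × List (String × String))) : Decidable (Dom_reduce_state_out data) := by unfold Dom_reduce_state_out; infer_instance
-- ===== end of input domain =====

-- B replaces A's per-state filter-then-sort with three staged passes: seed the output skeleton,
-- globally sort ALL allowed (state, key, value) triples once, then group them back (objective: alternative).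

-- ===== PORT A =====
-- dicts are PySem.Dict built from the association lists
def reduce_state_out (data : List (String × List (String × String))) : List (String × List (String × String)) :=
  let d : PySem.Dict String (List (String × String)) := PySem.Dict.ofList data
  (d.items.foldl (fun out sd =>
      let sub : PySem.Dict String String := PySem.Dict.ofList sd.2
      let tmp := sub.items.foldl (fun t kv =>
          if (["changes", "comment", "name", "result"] : List String).contains kv.1
          then t.insert kv.1 kv.2 else t) PySem.Dict.empty
      out.insert sd.1 (PySem.Dict.ofList (PySem.List.sorted2 tmp.items Prod.fst Prod.snd)).items)
    PySem.Dict.empty).items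

-- ===== PORT B =====
-- out = {state: {} for state in data};
-- flat = sorted(((s, k, sub[k]) for s, sub in data.items() for k in sub if k in allow), key=lambda t: t[:2]);
-- for s, k, v in flat: out[s][k] = v          ('for k in sub … sub[k]' = sub.items; out[s] is always seeded)
def reduce_state_out_alt (data : List (String × List (String × String))) : List (String × List (String × String)) :=
  let d : PySem.Dict String (List (String × String)) := PySem.Dict.ofList data
  let out0 : PySem.Dict String (PySem.Dict String String) :=
    d.items.foldl (fun o sd => o.insert sd.1 PySem.Dict.empty) PySem.Dict.empty
  let flat : List (String × String × String) :=
    PySem.List.sorted2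
      (d.items.flatMap (fun sd =>
        ((PySem.Dict.ofList sd.2).items.filter
            (fun kv => (["changes", "comment", "name", "result"] : List String).contains kv.1)).map
          (fun kv => (sd.1, kv))))
      (fun t => t.1) (fun t => t.2.1)
  let outf := flat.foldl (fun o t => o.modify t.1 PySem.Dict.empty (fun sub => sub.insert t.2.1 t.2.2)) out0
  outf.items.map (fun sd => (sd.1, sd.2.items))

-- ===== PRECONDITION & SPEC =====
def Spec_reduce_state_out (data : List (String × List (String × String))) (out : List (String × List (String × String))) : Prop := out = reduce_state_out_alt data
instance (data : List (String × List (String × String))) (out : List (String × List (String × String))) : Decidable (Spec_reduce_state_out data out) := by unfold Spec_reduce_state_out; infer_instance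

-- ===== CLAIM (what is proved, stated in full; the proofs are below) =====
def Claim_equal_reduce_state_out : Prop := ∀ (data : List (String × List (String × String))), Dom_reduce_state_out data → Spec_reduce_state_out data (reduce_state_out data)

-- ===== LEMMAS AND PROOFS =====

def pvAllow : List String := ["changes", "comment", "name", "result"]

-- the canonical per-state result both ports compute
def pvTgt (sub : List (String × String)) : List (String × String) :=
  pvAllow.filterMap (fun k => ((PySem.Dict.ofList sub).get? k).map (fun v => (k, v)))

-- the inner computation of A's fold body
def pvInnerA (sub : List (String × String)) : List (String × String) :=
  (PySem.Dict.ofList (PySem.List.sorted2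
    ((PySem.Dict.ofList sub).items.foldl (fun t kv =>
        if pvAllow.contains kv.1
        then t.insert kv.1 kv.2 else t) (PySem.Dict.empty : PySem.Dict String String)).items
    Prod.fst Prod.snd)).items

-- one state's block of (state, key, value) triples in B's flat list
def pvBlock (sd : String × List (String × String)) : List (String × String × String) :=
  ((PySem.Dict.ofList sd.2).items.filter (fun kv => pvAllow.contains kv.1)).map
    (fun kv => (sd.1, kv))

-- a Dict built from a list with pairwise-distinct keys has exactly that items list
theorem pv_ofList_items_of_nodup {ν : Type} (l : List (String × ν))
    (h : (l.map Prod.fst).Nodup) : (PySem.Dict.ofList l).items = l := by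
  have := PySem.Dict.items_foldl_insert_fresh l Prod.fst Prod.snd PySem.Dict.empty
    (fun a _ => PySem.Dict.contains_empty a.1) h
  simpa [PySem.Dict.ofList, PySem.Dict.update] using this

-- insertBy only looks at 'before x y' for y in the accumulator
theorem pv_insertBy_congr {α : Type} (before before' : α → α → Bool) (x : α) :
    ∀ (acc : List α), (∀ y ∈ acc, before x y = before' x y) →
    PySem.List.insertBy before x acc = PySem.List.insertBy before' x acc := by
  intro acc
  induction acc with
  | nil => intro _; simp [PySem.List.insertBy]
  | cons y ys ih =>
    intro h
    simp only [PySem.List.insertBy, h y (by simp)]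
    by_cases hb : before' x y = true
    · simp [hb]
    · simp [hb, ih (fun z hz => h z (by simp [hz]))]

theorem pv_foldl_insertBy_congr {α : Type} (before before' : α → α → Bool) :
    ∀ (l acc : List α), (∀ x ∈ l, ∀ y, (y ∈ acc ∨ y ∈ l) → before x y = before' x y) →
    l.foldl (fun a x => PySem.List.insertBy before x a) acc
      = l.foldl (fun a x => PySem.List.insertBy before' x a) acc := by
  intro l
  induction l with
  | nil => intro _ _; rfl
  | cons x xs ih =>
    intro acc h
    simp only [List.foldl_cons]
    rw [pv_insertBy_congr before before' x acc
      (fun y hy => h x (by simp) y (Or.inl hy))]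
    exact ih _ (fun a ha y hy => by
      have ha' : a ∈ x :: xs := List.mem_cons_of_mem _ ha
      rcases hy with hy | hy
      · rcases (PySem.List.mem_insertBy before' x y acc).1 hy with h1 | h2
        · exact h a ha' y (Or.inr (by simp [h1]))
        · exact h a ha' y (Or.inl h2)
      · exact h a ha' y (Or.inr (List.mem_cons_of_mem _ hy)))

-- on a list with pairwise-distinct first components, sorting pairs lexicographically = sorting by key
theorem pv_sorted2_eq_sorted_fst {ν : Type} [LinearOrder ν] (F : List (String × ν))
    (h : (F.map Prod.fst).Nodup) :
    PySem.List.sorted2 F Prod.fst Prod.snd = PySem.List.sorted F Prod.fst := by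
  rw [PySem.List.sorted_eq_foldl_insertBy]
  show F.foldl (fun acc x => PySem.List.insertBy
      (fun a b => decide (a.1 < b.1) || (!decide (b.1 < a.1) && decide (a.2 < b.2))) x acc) []
    = _
  apply pv_foldl_insertBy_congr
  intro x hx y hy
  rcases hy with hy | hy
  · simp at hy
  · rcases lt_trichotomy x.1 y.1 with hlt | heq | hgt
    · simp [hlt, not_lt_of_gt hlt]
    · have : x = y := List.inj_on_of_nodup_map h hx hy heq
      subst this
      simp
    · simp [hgt, not_lt_of_gt hgt]

-- the canonical target: strictly key-sorted, and a permutation of the filtered sub-items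
theorem pv_tgt_pairwise (sub : List (String × String)) :
    (pvTgt sub).Pairwise (fun a b => a.1 < b.1) := by
  unfold pvTgt
  refine List.pairwise_filterMap.2 ?_
  have hsorted' : pvAllow.Pairwise (fun a b => a.toList < b.toList) := by decide
  have hsorted : pvAllow.Pairwise (· < ·) :=
    hsorted'.imp (fun h => String.lt_iff_toList_lt.2 h)
  refine hsorted.imp_of_mem ?_
  intro a b _ _ hab p hp q hq
  simp only [Option.map_eq_some_iff] at hp hq
  obtain ⟨v, -, rfl⟩ := hp
  obtain ⟨w, -, rfl⟩ := hq
  exact hab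

theorem pv_tgt_perm (sub : List (String × String)) :
    (pvTgt sub).Perm
      ((PySem.Dict.ofList sub).items.filter (fun kv => pvAllow.contains kv.1)) := by
  set s : PySem.Dict String String := PySem.Dict.ofList sub with hs
  have hnd : (s.items.map Prod.fst).Nodup := by
    have := PySem.Dict.nodup_keys_ofList (κ := String) (ν := String) sub
    simpa [PySem.Dict.keys, hs] using this
  have hknd : s.keys.Nodup := by simpa [PySem.Dict.keys] using hnd
  have hFnd : ((s.items.filter (fun kv => pvAllow.contains kv.1)).map Prod.fst).Nodup :=
    hnd.sublist (List.Sublist.map Prod.fst List.filter_sublist)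
  have hFnodup : (s.items.filter (fun kv => pvAllow.contains kv.1)).Nodup := hFnd.of_map
  have htnodup : (pvTgt sub).Nodup := (pv_tgt_pairwise sub).imp (fun h => by
    intro heq; subst heq; exact lt_irrefl _ h)
  refine (List.perm_ext_iff_of_nodup htnodup hFnodup).2 ?_
  intro a
  constructor
  · intro ha
    unfold pvTgt at ha
    simp only [List.mem_filterMap, Option.map_eq_some_iff] at ha
    obtain ⟨k, hk, v, hv, rfl⟩ := ha
    have hmem : (k, v) ∈ s.items :=
      (PySem.Dict.get?_eq_some_iff_mem_items s k v hknd).1 hv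
    simp only [List.mem_filter]
    exact ⟨hmem, by simpa using hk⟩
  · intro ha
    simp only [List.mem_filter] at ha
    obtain ⟨hmem, hcontains⟩ := ha
    unfold pvTgt
    simp only [List.mem_filterMap, Option.map_eq_some_iff]
    refine ⟨a.1, by simpa using hcontains, a.2, ?_, rfl⟩
    exact (PySem.Dict.get?_eq_some_iff_mem_items s a.1 a.2 hknd).2 (by simpa using hmem)

theorem pv_tgt_fst_nodup (sub : List (String × String)) :
    ((pvTgt sub).map Prod.fst).Nodup := by
  have : ((pvTgt sub).map Prod.fst).Pairwise (· < ·) :=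
    List.pairwise_map.2 (pv_tgt_pairwise sub)
  exact this.imp (fun h => ne_of_lt h)

-- A's inner computation equals the canonical target
theorem pv_inner_eq (sub : List (String × String)) : pvInnerA sub = pvTgt sub := by
  unfold pvInnerA
  set s : PySem.Dict String String := PySem.Dict.ofList sub with hs
  have hnd : (s.items.map Prod.fst).Nodup := by
    have := PySem.Dict.nodup_keys_ofList (κ := String) (ν := String) sub
    simpa [PySem.Dict.keys, hs] using this
  have htmp : (s.items.foldl (fun t kv =>
      if pvAllow.contains kv.1
      then t.insert kv.1 kv.2 else t) PySem.Dict.empty).items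
      = s.items.filter (fun kv => pvAllow.contains kv.1) := by
    rw [PySem.List.foldl_if_eq_foldl_filter]
    have hnd' : ((s.items.filter (fun kv => pvAllow.contains kv.1)).map Prod.fst).Nodup :=
      hnd.sublist (List.Sublist.map Prod.fst List.filter_sublist)
    have := PySem.Dict.items_foldl_insert_fresh
      (s.items.filter (fun kv => pvAllow.contains kv.1))
      Prod.fst Prod.snd PySem.Dict.empty (fun a _ => PySem.Dict.contains_empty a.1) hnd'
    simpa using this
  rw [htmp]
  have hFnd : ((s.items.filter (fun kv => pvAllow.contains kv.1)).map Prod.fst).Nodup :=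
    hnd.sublist (List.Sublist.map Prod.fst List.filter_sublist)
  have hsort : PySem.List.sorted2 (s.items.filter (fun kv => pvAllow.contains kv.1))
      Prod.fst Prod.snd = pvTgt sub := by
    rw [pv_sorted2_eq_sorted_fst _ hFnd]
    exact PySem.List.sorted_eq_of_perm_of_pairwise_lt _ _ Prod.fst
      (pv_tgt_perm sub) (pv_tgt_pairwise sub)
  rw [hsort]
  exact pv_ofList_items_of_nodup _ (pv_tgt_fst_nodup sub)

theorem pv_a_main (data : List (String × List (String × String))) :
    reduce_state_out data
      = (PySem.Dict.ofList data).items.map (fun sd => (sd.1, pvTgt sd.2)) := by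
  show ((PySem.Dict.ofList data).items.foldl (fun out sd => out.insert sd.1 (pvInnerA sd.2))
      PySem.Dict.empty).items = _
  set d : PySem.Dict String (List (String × String)) := PySem.Dict.ofList data with hd
  have hnd : (d.items.map Prod.fst).Nodup := by
    have := PySem.Dict.nodup_keys_ofList (κ := String) (ν := List (String × String)) data
    simpa [PySem.Dict.keys, hd] using this
  have hA := PySem.Dict.items_foldl_insert_fresh d.items Prod.fst (fun sd => pvInnerA sd.2)
    PySem.Dict.empty (fun a _ => PySem.Dict.contains_empty a.1) hnd
  rw [hA]
  have he : (PySem.Dict.empty : PySem.Dict String (List (String × String))).items = [] := rfl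
  rw [he, List.nil_append]
  exact List.map_congr_left (fun sd _ => by simp only [pv_inner_eq])

-- ordering invariant of B's global sort: lex-≤ on the (state, key) pair
def pvR (a b : String × String × String) : Prop :=
  a.1 < b.1 ∨ (a.1 = b.1 ∧ a.2.1 ≤ b.2.1)

theorem pv_R_trans : ∀ {a b c}, pvR a b → pvR b c → pvR a c := by
  intro a b c hab hbc
  rcases hab with h1 | ⟨h1, h1'⟩ <;> rcases hbc with h2 | ⟨h2, h2'⟩
  · exact Or.inl (lt_trans h1 h2)
  · exact Or.inl (h2 ▸ h1)
  · exact Or.inl (h1 ▸ h2)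
  · exact Or.inr ⟨h1.trans h2, le_trans h1' h2'⟩

theorem pv_pairwise_insertBy {α : Type} (R : α → α → Prop) (before : α → α → Bool)
    (htrans : ∀ {a b c}, R a b → R b c → R a c)
    (h1 : ∀ a b, before a b = true → R a b) (h2 : ∀ a b, before a b = false → R b a)
    (x : α) : ∀ (acc : List α), acc.Pairwise R →
      (PySem.List.insertBy before x acc).Pairwise R := by
  intro acc
  induction acc with
  | nil => intro _; simp [PySem.List.insertBy]
  | cons y ys ih =>
    intro hp
    rw [List.pairwise_cons] at hp
    obtain ⟨hy, hys⟩ := hp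
    show (if before x y = true then x :: y :: ys else y :: PySem.List.insertBy before x ys).Pairwise R
    by_cases hb : before x y = true
    · rw [if_pos hb]
      refine List.pairwise_cons.2 ⟨?_, List.pairwise_cons.2 ⟨hy, hys⟩⟩
      intro z hz
      rcases List.mem_cons.1 hz with h' | hz
      · rw [h']; exact h1 x y hb
      · exact htrans (h1 x y hb) (hy _ hz)
    · rw [if_neg hb]
      refine List.pairwise_cons.2 ⟨?_, ih hys⟩
      intro z hz
      rcases (PySem.List.mem_insertBy before x z ys).1 hz with hzx | hz
      · rw [hzx]; exact h2 x y (by simpa using hb)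
      · exact hy _ hz

theorem pv_sorted2_pairwise (xs : List (String × String × String)) :
    (PySem.List.sorted2 xs (fun t => t.1) (fun t => t.2.1)).Pairwise pvR := by
  show (xs.foldl (fun acc x => PySem.List.insertBy
      (fun a b => decide (a.1 < b.1) || (!decide (b.1 < a.1) && decide (a.2.1 < b.2.1))) x acc)
      []).Pairwise pvR
  have key : ∀ (l acc : List (String × String × String)), acc.Pairwise pvR →
      (l.foldl (fun acc x => PySem.List.insertBy
        (fun a b => decide (a.1 < b.1) || (!decide (b.1 < a.1) && decide (a.2.1 < b.2.1))) x acc)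
        acc).Pairwise pvR := by
    intro l
    induction l with
    | nil => intro acc h; exact h
    | cons x xs ih =>
      intro acc h
      refine ih _ (pv_pairwise_insertBy pvR _ pv_R_trans ?_ ?_ x acc h)
      · intro a b hb
        simp only [Bool.or_eq_true, Bool.and_eq_true, Bool.not_eq_true', decide_eq_true_eq,
          decide_eq_false_iff_not] at hb
        rcases hb with hb | ⟨hb1, hb2⟩
        · exact Or.inl hb
        · rcases lt_or_eq_of_le (not_lt.1 hb1) with h' | h'
          · exact Or.inl h'
          · exact Or.inr ⟨h', le_of_lt hb2⟩
      · intro a b hb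
        simp only [Bool.or_eq_false_iff, Bool.and_eq_false_iff, Bool.not_eq_false',
          decide_eq_true_eq, decide_eq_false_iff_not] at hb
        obtain ⟨hb1, hb2⟩ := hb
        rcases lt_or_eq_of_le (not_lt.1 hb1) with h' | h'
        · exact Or.inl h'
        · rcases hb2 with hb2 | hb2
          · exact Or.inl hb2
          · exact Or.inr ⟨h', not_lt.1 hb2⟩
  exact key xs [] (List.Pairwise.nil)

-- the (state, key) pairs of the unsorted flat list are pairwise distinct
theorem pv_kp_nodup : ∀ (I : List (String × List (String × String))),
    (I.map Prod.fst).Nodup →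
    ((I.flatMap pvBlock).map (fun t => (t.1, t.2.1))).Nodup := by
  intro I
  induction I with
  | nil => intro _; simp
  | cons h I ih =>
    intro hnd
    rw [List.map_cons, List.nodup_cons] at hnd
    obtain ⟨hh, hI⟩ := hnd
    rw [List.flatMap_cons, List.map_append]
    refine List.Nodup.append ?_ (ih hI) ?_
    · unfold pvBlock
      rw [List.map_map]
      have : ((fun t : String × String × String => (t.1, t.2.1)) ∘ (fun kv : String × String => (h.1, kv)))
          = (fun kv : String × String => (h.1, kv.1)) := rfl
      rw [this]
      have hknd : (((PySem.Dict.ofList h.2).items.filter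
          (fun kv => pvAllow.contains kv.1)).map Prod.fst).Nodup := by
        have hnd2 : ((PySem.Dict.ofList h.2).items.map Prod.fst).Nodup := by
          have := PySem.Dict.nodup_keys_ofList (κ := String) (ν := String) h.2
          simpa [PySem.Dict.keys] using this
        exact hnd2.sublist (List.Sublist.map Prod.fst List.filter_sublist)
      have : (fun kv : String × String => (h.1, kv.1))
          = (fun k : String => (h.1, k)) ∘ Prod.fst := rfl
      rw [this, ← List.map_map]
      exact hknd.map (fun a b hab => by simpa using hab)
    · intro p hp hq
      simp only [List.mem_map] at hp hq
      obtain ⟨t, ht, rfl⟩ := hp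
      obtain ⟨t', ht', heq⟩ := hq
      unfold pvBlock at ht
      simp only [List.mem_map] at ht
      obtain ⟨kv, -, rfl⟩ := ht
      simp only [List.mem_flatMap] at ht'
      obtain ⟨sd', hsd', ht'⟩ := ht'
      unfold pvBlock at ht'
      simp only [List.mem_map] at ht'
      obtain ⟨kv', -, rfl⟩ := ht'
      have h1 : sd'.1 = h.1 := by simpa using congrArg Prod.fst heq
      exact hh (h1 ▸ List.mem_map_of_mem hsd')

-- the unsorted flat list filtered to one state is exactly that state's block
theorem pv_filter_u (sd : String × List (String × String)) :
    ∀ (I : List (String × List (String × String))),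
    (I.map Prod.fst).Nodup → sd ∈ I →
    (I.flatMap pvBlock).filter (fun t => t.1 == sd.1) = pvBlock sd := by
  intro I
  induction I with
  | nil => intro _ h; simp at h
  | cons h I ih =>
    intro hnd hmem
    rw [List.map_cons, List.nodup_cons] at hnd
    obtain ⟨hh, hI⟩ := hnd
    rw [List.flatMap_cons, List.filter_append]
    rcases List.mem_cons.1 hmem with heq | hmem
    · subst heq
      have h1 : (pvBlock sd).filter (fun t => t.1 == sd.1) = pvBlock sd := by
        refine List.filter_eq_self.2 ?_
        intro t ht
        unfold pvBlock at ht
        simp only [List.mem_map] at ht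
        obtain ⟨kv, -, rfl⟩ := ht
        simp
      have h2 : (I.flatMap pvBlock).filter (fun t => t.1 == sd.1) = [] := by
        refine List.filter_eq_nil_iff.2 ?_
        intro t ht
        simp only [List.mem_flatMap] at ht
        obtain ⟨sd', hsd', ht⟩ := ht
        unfold pvBlock at ht
        simp only [List.mem_map] at ht
        obtain ⟨kv, -, rfl⟩ := ht
        simp only [beq_iff_eq]
        intro heq
        exact hh (heq ▸ List.mem_map_of_mem hsd')
      rw [h1, h2, List.append_nil]
    · have hne : h.1 ≠ sd.1 := by
        intro heq
        exact hh (heq ▸ List.mem_map_of_mem hmem)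
      have h1 : (pvBlock h).filter (fun t => t.1 == sd.1) = [] := by
        refine List.filter_eq_nil_iff.2 ?_
        intro t ht
        unfold pvBlock at ht
        simp only [List.mem_map] at ht
        obtain ⟨kv, -, rfl⟩ := ht
        simpa using hne
      rw [h1, List.nil_append]
      exact ih hI hmem

-- grouping: the modify-loop over the flat triples fills each seeded state's sub-dict
theorem pv_group : ∀ (l : List (String × String × String))
    (o : PySem.Dict String (PySem.Dict String String)),
    o.keys.Nodup → (∀ t ∈ l, o.contains t.1 = true) →
    (l.foldl (fun o t => o.modify t.1 PySem.Dict.empty (fun sub => sub.insert t.2.1 t.2.2)) o).items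
      = o.items.map (fun p => (p.1, (l.filter (fun t => t.1 == p.1)).foldl
          (fun sub t => sub.insert t.2.1 t.2.2) p.2)) := by
  intro l
  induction l with
  | nil =>
    intro o _ _
    simp
  | cons t l ih =>
    intro o hknd hc
    have hct : o.contains t.1 = true := hc t (by simp)
    rw [List.foldl_cons]
    set o' := o.modify t.1 PySem.Dict.empty (fun sub => sub.insert t.2.1 t.2.2) with ho'
    have hitems' : o'.items = o.items.map (fun p =>
        if p.1 == t.1 then (p.1, p.2.insert t.2.1 t.2.2) else p) := by
      rw [ho']
      show (o.insert t.1 ((o.getD t.1 PySem.Dict.empty).insert t.2.1 t.2.2)).items = _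
      rw [PySem.Dict.items_insert_of_contains o _ hct]
      refine List.map_congr_left ?_
      intro p hp
      by_cases hpt : p.1 == t.1
      · rw [if_pos hpt, if_pos hpt]
        have hpt' : p.1 = t.1 := by simpa using hpt
        have hmemi : (t.1, p.2) ∈ o.items := by
          have : p = (t.1, p.2) := by rw [← hpt']
          exact this ▸ hp
        have hg : o.getD t.1 PySem.Dict.empty = p.2 :=
          PySem.Dict.getD_of_mem_items o hmemi hknd PySem.Dict.empty
        rw [hpt', hg]
      · rw [if_neg hpt, if_neg hpt]
    have hkeys' : o'.keys = o.keys := by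
      show o'.items.map Prod.fst = o.items.map Prod.fst
      rw [hitems', List.map_map]
      refine List.map_congr_left ?_
      intro p _
      simp only [Function.comp_apply]
      split <;> rfl
    have hcon' : ∀ x, o'.contains x = o.contains x := by
      intro x
      rw [PySem.Dict.contains_eq_decide_mem_keys, PySem.Dict.contains_eq_decide_mem_keys, hkeys']
    rw [ih o' (hkeys' ▸ hknd) (fun t' ht' => by rw [hcon']; exact hc t' (List.mem_cons_of_mem _ ht'))]
    rw [hitems', List.map_map]
    refine List.map_congr_left ?_
    intro p _
    by_cases hpt : p.1 == t.1
    · have hpt' : p.1 = t.1 := by simpa using hpt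
      have htp : (t.1 == p.1) = true := by simp [hpt']
      simp only [Function.comp_apply, List.filter_cons, hpt']
      simp
    · have htp : (t.1 == p.1) = false := by
        simp only [beq_eq_false_iff_ne, ne_eq]
        intro h; exact absurd (by simp [h]) hpt
      simp only [Function.comp_apply, if_neg hpt, List.filter_cons, htp]
      simp

-- strict per-state order used to pin down the filtered flat list
def pvRk (a b : String × String × String) : Prop := a.2.1 < b.2.1

theorem pv_alt_main (data : List (String × List (String × String))) :
    reduce_state_out_alt data
      = (PySem.Dict.ofList data).items.map (fun sd => (sd.1, pvTgt sd.2)) := by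
  set d : PySem.Dict String (List (String × String)) := PySem.Dict.ofList data with hd
  have hnd : (d.items.map Prod.fst).Nodup := by
    have := PySem.Dict.nodup_keys_ofList (κ := String) (ν := List (String × String)) data
    simpa [PySem.Dict.keys, hd] using this
  show ((PySem.List.sorted2 (d.items.flatMap pvBlock) (fun t => t.1) (fun t => t.2.1)).foldl
      (fun o t => o.modify t.1 PySem.Dict.empty (fun sub => sub.insert t.2.1 t.2.2))
      (d.items.foldl (fun o sd => o.insert sd.1 PySem.Dict.empty) PySem.Dict.empty)).items.map
        (fun sd => (sd.1, sd.2.items))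
    = d.items.map (fun sd => (sd.1, pvTgt sd.2))
  set flat := PySem.List.sorted2 (d.items.flatMap pvBlock) (fun t => t.1) (fun t => t.2.1) with hflat
  set out0 := d.items.foldl (fun o sd => o.insert sd.1 PySem.Dict.empty) PySem.Dict.empty with hout0
  have h0 : out0.items = d.items.map (fun sd => (sd.1, (PySem.Dict.empty : PySem.Dict String String))) := by
    rw [hout0]
    have := PySem.Dict.items_foldl_insert_fresh d.items Prod.fst
      (fun _ => (PySem.Dict.empty : PySem.Dict String String)) PySem.Dict.empty
      (fun a _ => PySem.Dict.contains_empty a.1) hnd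
    simpa using this
  have hkeys0 : out0.keys = d.items.map Prod.fst := by
    show out0.items.map Prod.fst = _
    rw [h0, List.map_map]
    rfl
  have hknd0 : out0.keys.Nodup := hkeys0 ▸ hnd
  have hpermflat : flat.Perm (d.items.flatMap pvBlock) := PySem.List.sorted2_perm _ _ _ _
  have hc : ∀ t ∈ flat, out0.contains t.1 = true := by
    intro t ht
    have htu : t ∈ d.items.flatMap pvBlock := hpermflat.mem_iff.1 ht
    simp only [List.mem_flatMap] at htu
    obtain ⟨sd, hsd, ht⟩ := htu
    unfold pvBlock at ht
    simp only [List.mem_map] at ht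
    obtain ⟨kv, -, rfl⟩ := ht
    rw [PySem.Dict.contains_eq_decide_mem_keys, hkeys0]
    simp only [decide_eq_true_eq]
    exact List.mem_map_of_mem hsd
  rw [pv_group flat out0 hknd0 hc, h0, List.map_map, List.map_map]
  refine List.map_congr_left ?_
  intro sd hsd
  simp only [Function.comp_apply]
  refine Prod.ext rfl ?_
  show ((flat.filter (fun t => t.1 == sd.1)).foldl
      (fun sub t => sub.insert t.2.1 t.2.2) PySem.Dict.empty).items = pvTgt sd.2
  have hfilter : flat.filter (fun t => t.1 == sd.1)
      = (pvTgt sd.2).map (fun kv => (sd.1, kv)) := by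
    have hperm : (flat.filter (fun t => t.1 == sd.1)).Perm
        ((pvTgt sd.2).map (fun kv => (sd.1, kv))) := by
      refine ((hpermflat.filter _).trans ?_)
      rw [pv_filter_u sd d.items hnd hsd]
      unfold pvBlock
      exact ((pv_tgt_perm sd.2).map _).symm
    have hs2 : ((pvTgt sd.2).map (fun kv => (sd.1, kv))).Pairwise pvRk := by
      refine List.pairwise_map.2 ?_
      exact (pv_tgt_pairwise sd.2).imp (fun h => h)
    have hs1 : (flat.filter (fun t => t.1 == sd.1)).Pairwise pvRk := by
      have hRpw : flat.Pairwise pvR := hflat ▸ pv_sorted2_pairwise _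
      have hkpnodup : (flat.map (fun t => (t.1, t.2.1))).Nodup := by
        have := pv_kp_nodup d.items hnd
        exact ((hpermflat.map _).nodup_iff).2 this
      have hkppw : flat.Pairwise (fun a b => (a.1, a.2.1) ≠ (b.1, b.2.1)) :=
        List.pairwise_map.1 hkpnodup
      have hand := hRpw.and hkppw
      have hsub : (flat.filter (fun t => t.1 == sd.1)).Pairwise
          (fun a b => pvR a b ∧ (a.1, a.2.1) ≠ (b.1, b.2.1)) :=
        hand.sublist List.filter_sublist
      refine hsub.imp_of_mem ?_
      intro a b ha hb hab
      have ha1 : a.1 = sd.1 := by simpa using (List.mem_filter.1 ha).2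
      have hb1 : b.1 = sd.1 := by simpa using (List.mem_filter.1 hb).2
      obtain ⟨hR, hne⟩ := hab
      rcases hR with h | ⟨-, h⟩
      · exact absurd (ha1.trans hb1.symm) (ne_of_lt h)
      · rcases lt_or_eq_of_le h with h' | h'
        · exact h'
        · exact absurd (by rw [ha1, hb1, h']) hne
    exact List.Perm.eq_of_pairwise
      (fun a b _ _ h1 h2 => absurd (lt_trans h1 h2) (lt_irrefl _)) hs1 hs2 hperm
  rw [hfilter]
  have := PySem.Dict.items_foldl_insert_fresh ((pvTgt sd.2).map (fun kv => (sd.1, kv)))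
    (fun t => t.2.1) (fun t => t.2.2) PySem.Dict.empty
    (fun a _ => PySem.Dict.contains_empty _) (by
      rw [List.map_map]
      exact pv_tgt_fst_nodup sd.2)
  rw [this]
  simp [List.map_map, PySem.Dict.empty]

-- ===== VERDICT (by name: the statement is the Claim_ definition above) =====
theorem reduce_state_out_spec : Claim_equal_reduce_state_out := by
  intro data _
  show reduce_state_out data = reduce_state_out_alt data
  rw [pv_a_main, pv_alt_main]
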